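-- pv_equiv track=rewrite | github.com/sunaminusone/Beer-Game-Simulation | src/environment/supply_chain_env.py | code_state
-- ===== SOURCE A (Python) =====
-- def code_state(state):
--     coded_state = []
--     for inventory in state:
--         if inventory < -6:
--             coded_state.append(1)
--         elif inventory < -3:
--             coded_state.append(2)
--         elif inventory < 0:
--             coded_state.append(3)
--         elif inventory < 3:
--             coded_state.append(4)
--         elif inventory < 6:
--             coded_state.append(5)
--         elif inventory < 10:
--             coded_state.append(6)
--         elif inventory < 15:
--             coded_state.append(7)
--         elif inventory < 20:
--             coded_state.append(8)
--         else:
--             coded_state.append(9)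
--     return tuple(coded_state)
-- ===== SOURCE B (Python) =====
-- _THRESHOLDS = [-6, -3, 0, 3, 6, 10, 15, 20]
--
-- def code_state(state):
--     # branchless: code = 1 + number of thresholds that inventory has reached
--     return tuple(1 + sum(inv >= t for t in _THRESHOLDS) for inv in state)
-- ===== Notes on version B (the rewrite author's own statement) =====
-- stated objective: idiomatic
-- what changed: Replaces the eight-way if/elif comparison cascade with a table of breakpoints and a branchless count (code = 1 + number of thresholds reached), mapped over the state.
import Mathlib
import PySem

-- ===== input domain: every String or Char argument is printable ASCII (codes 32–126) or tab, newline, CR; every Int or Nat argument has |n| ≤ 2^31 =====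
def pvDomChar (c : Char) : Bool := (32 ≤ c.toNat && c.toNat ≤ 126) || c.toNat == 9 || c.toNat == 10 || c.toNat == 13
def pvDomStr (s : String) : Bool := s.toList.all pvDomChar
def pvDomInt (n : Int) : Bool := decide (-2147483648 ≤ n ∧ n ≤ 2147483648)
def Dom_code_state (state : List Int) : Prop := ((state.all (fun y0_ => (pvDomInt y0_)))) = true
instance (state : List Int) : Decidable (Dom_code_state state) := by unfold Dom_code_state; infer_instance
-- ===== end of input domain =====

-- B replaces the eight-branch comparison cascade with a threshold table and a branchless count (idiomatic, same cost).


-- ===== PORT A =====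
def code_state (state : List Int) : List Int :=
  (state.foldl (fun coded inventory =>
      coded ++ [if inventory < -6 then (1 : Int)
        else if inventory < -3 then 2
        else if inventory < 0 then 3
        else if inventory < 3 then 4
        else if inventory < 6 then 5
        else if inventory < 10 then 6
        else if inventory < 15 then 7
        else if inventory < 20 then 8
        else 9]) [])

-- ===== PORT B =====
def pvThresholds : List Int := [-6, -3, 0, 3, 6, 10, 15, 20]

def code_state_alt (state : List Int) : List Int :=
  state.map (fun inv => 1 + (pvThresholds.foldl (fun acc t => acc + (if inv ≥ t then (1 : Int) else 0)) 0))

-- ===== PRECONDITION & SPEC =====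
def Spec_code_state (state : List Int) (out : List Int) : Prop := out = code_state_alt state
instance (state : List Int) (out : List Int) : Decidable (Spec_code_state state out) := by unfold Spec_code_state; infer_instance

-- ===== CLAIM (what is proved, stated in full; the proofs are below) =====
def Claim_equal_code_state : Prop := ∀ (state : List Int), Dom_code_state state → Spec_code_state state (code_state state)

-- ===== LEMMAS AND PROOFS =====

-- ===== VERDICT (by name: the statement is the Claim_ definition above) =====
set_option maxHeartbeats 2000000 in
theorem elem_eq (inv : Int) :
    (if inv < -6 then (1 : Int)
      else if inv < -3 then 2
      else if inv < 0 then 3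
      else if inv < 3 then 4
      else if inv < 6 then 5
      else if inv < 10 then 6
      else if inv < 15 then 7
      else if inv < 20 then 8
      else 9)
    = 1 + (pvThresholds.foldl (fun acc t => acc + (if inv ≥ t then (1 : Int) else 0)) 0) := by
  simp only [pvThresholds, List.foldl]
  split_ifs <;> omega

theorem foldl_append_map (l : List Int) (acc : List Int) (f : Int → Int) :
    l.foldl (fun coded inventory => coded ++ [f inventory]) acc = acc ++ l.map f := by
  induction l generalizing acc with
  | nil => simp
  | cons h t ih => simp [List.foldl, ih]

theorem code_state_spec : Claim_equal_code_state := by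
  intro state _
  unfold Spec_code_state code_state code_state_alt
  rw [foldl_append_map]
  simp only [List.nil_append]
  exact List.map_congr_left (fun inv _ => elem_eq inv)
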